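-- pv_equiv track=rewrite | github.com/stephenplace/Disco_zoo_analysis | Disco_functions.py | list_two_animal_positions
-- ===== SOURCE A (Python) =====
-- def list_two_animal_positions(animal_1,animal_2):
--     choices = []
--     for i in range(len(animal_1)):
--         Set1 = set(animal_1[i])
--         for j in range(len(animal_2)):
--             Set2 = set(animal_2[j])
--             if bool(Set1 & Set2) == False:
--                 choices.append([i,j])
--     return choices
-- ===== SOURCE B (Python) =====
-- def list_two_animal_positions(animal_1, animal_2):
--     # Inverted index: element value -> set of indices j whose animal_2[j] contains it.
--     index = {}
--     for j in range(len(animal_2)):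
--         for x in animal_2[j]:
--             index[x] = index.get(x, set()) | {j}
--     choices = []
--     for i in range(len(animal_1)):
--         forbidden = set()
--         for x in animal_1[i]:
--             forbidden |= index.get(x, set())
--         for j in range(len(animal_2)):
--             if j not in forbidden:
--                 choices.append([i, j])
--     return choices
-- ===== Notes on version B (the rewrite author's own statement) =====
-- stated objective: faster
-- what changed: Replaces A's nested scan that builds and intersects set(animal_1[i]) and set(animal_2[j]) for every pair with an inverted index (element -> set of animal_2 row indices) built once, so each (i,j) pair is decided by a single membership test in a precomputed 'forbidden' set.
import Mathlib
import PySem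

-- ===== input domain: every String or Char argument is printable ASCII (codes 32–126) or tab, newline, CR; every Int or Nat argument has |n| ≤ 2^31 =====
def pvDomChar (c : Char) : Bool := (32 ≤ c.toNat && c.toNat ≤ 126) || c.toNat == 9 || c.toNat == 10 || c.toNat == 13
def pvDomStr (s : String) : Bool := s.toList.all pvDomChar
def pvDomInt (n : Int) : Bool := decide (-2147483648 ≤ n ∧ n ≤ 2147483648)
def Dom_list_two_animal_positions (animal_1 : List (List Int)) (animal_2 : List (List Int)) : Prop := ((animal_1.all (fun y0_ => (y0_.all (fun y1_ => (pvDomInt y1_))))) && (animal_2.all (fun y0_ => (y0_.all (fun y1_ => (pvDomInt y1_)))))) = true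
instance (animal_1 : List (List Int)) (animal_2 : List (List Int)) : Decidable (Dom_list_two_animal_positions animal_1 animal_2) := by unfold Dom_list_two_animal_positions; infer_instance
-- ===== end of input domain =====

-- B replaces A's quadratic-with-inner-set-intersection scan by an inverted index (element → set of
-- row indices of animal_2 containing it), so each pair test is a single set-membership check.

-- ===== PORT A =====
-- literal transliteration of A: nested index loops; 'bool(Set1 & Set2) == False' is
-- '(Set1 ∩ Set2).isEmpty' (a Python set is falsy exactly when empty)
def list_two_animal_positions (animal_1 : List (List Int)) (animal_2 : List (List Int)) : List (List Int) :=
  (PySem.List.pyRange 0 (animal_1.length : Int) 1).foldl (fun choices i =>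
    let Set1 : PySem.Set Int := PySem.Set.ofList (PySem.List.pyGetD animal_1 i [])
    (PySem.List.pyRange 0 (animal_2.length : Int) 1).foldl (fun choices j =>
      let Set2 : PySem.Set Int := PySem.Set.ofList (PySem.List.pyGetD animal_2 j [])
      if (PySem.Set.inter Set1 Set2).isEmpty then choices ++ [[i, j]] else choices) choices) []

-- ===== PORT B =====
-- literal transliteration of Source B: build the inverted index, then for each i union the index
-- entries of animal_1[i]'s elements into 'forbidden' and emit the non-forbidden j in order
def list_two_animal_positions_alt (animal_1 : List (List Int)) (animal_2 : List (List Int)) : List (List Int) :=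
  let index : PySem.Dict Int (PySem.Set Int) :=
    (PySem.List.pyRange 0 (animal_2.length : Int) 1).foldl (fun index j =>
      (PySem.List.pyGetD animal_2 j []).foldl (fun index x =>
        index.insert x (PySem.Set.union (index.getD x PySem.Set.empty) [j])) index) PySem.Dict.empty
  (PySem.List.pyRange 0 (animal_1.length : Int) 1).foldl (fun choices i =>
    let forbidden : PySem.Set Int :=
      (PySem.List.pyGetD animal_1 i []).foldl (fun forbidden x =>
        PySem.Set.union forbidden (index.getD x PySem.Set.empty)) PySem.Set.empty
    (PySem.List.pyRange 0 (animal_2.length : Int) 1).foldl (fun choices j =>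
      if !(PySem.Set.contains forbidden j) then choices ++ [[i, j]] else choices) choices) []

-- ===== PRECONDITION & SPEC =====
def Spec_list_two_animal_positions (animal_1 : List (List Int)) (animal_2 : List (List Int)) (out : List (List Int)) : Prop := out = list_two_animal_positions_alt animal_1 animal_2
instance (animal_1 : List (List Int)) (animal_2 : List (List Int)) (out : List (List Int)) : Decidable (Spec_list_two_animal_positions animal_1 animal_2 out) := by unfold Spec_list_two_animal_positions; infer_instance

-- ===== CLAIM (what is proved, stated in full; the proofs are below) =====
def Claim_equal_list_two_animal_positions : Prop := ∀ (animal_1 : List (List Int)) (animal_2 : List (List Int)), Dom_list_two_animal_positions animal_1 animal_2 → Spec_list_two_animal_positions animal_1 animal_2 (list_two_animal_positions animal_1 animal_2)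

-- ===== LEMMAS AND PROOFS =====

-- inner index-building loop (one row j): what ends up stored under key q
lemma pv_mem_getD_row (l : List Int) (j : Int) (d : PySem.Dict Int (PySem.Set Int)) (q y : Int) :
    y ∈ (l.foldl (fun d x => d.insert x (PySem.Set.union (d.getD x PySem.Set.empty) [j])) d).getD q PySem.Set.empty ↔
      y ∈ d.getD q PySem.Set.empty ∨ (q ∈ l ∧ y = j) := by
  induction l generalizing d with
  | nil => simp
  | cons x t ih =>
    simp only [List.foldl_cons, ih, PySem.Dict.getD_insert, List.mem_cons]
    by_cases h : q = x
    · subst h; simp [PySem.Set.mem_union]; tauto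
    · simp [h]

-- whole index-building loop: y is stored under key q iff row y of animal_2 contains q
lemma pv_mem_getD_build (animal_2 : List (List Int)) (js : List Int) (d : PySem.Dict Int (PySem.Set Int)) (q y : Int) :
    y ∈ (js.foldl (fun d j => (PySem.List.pyGetD animal_2 j []).foldl (fun d x =>
          d.insert x (PySem.Set.union (d.getD x PySem.Set.empty) [j])) d) d).getD q PySem.Set.empty ↔
      y ∈ d.getD q PySem.Set.empty ∨ ∃ j ∈ js, q ∈ PySem.List.pyGetD animal_2 j [] ∧ y = j := by
  induction js generalizing d with
  | nil => simp
  | cons j0 t ih =>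
    simp only [List.foldl_cons, ih, pv_mem_getD_row, List.mem_cons]
    aesop

-- the 'forbidden' union loop
lemma pv_mem_forbidden (l : List Int) (idx : PySem.Dict Int (PySem.Set Int)) (f0 : PySem.Set Int) (y : Int) :
    y ∈ l.foldl (fun f x => PySem.Set.union f (idx.getD x PySem.Set.empty)) f0 ↔
      y ∈ f0 ∨ ∃ x ∈ l, y ∈ idx.getD x PySem.Set.empty := by
  induction l generalizing f0 with
  | nil => simp
  | cons x t ih =>
    simp only [List.foldl_cons, ih, PySem.Set.mem_union, List.mem_cons]
    aesop

-- pointwise: for j in range(len(animal_2)), A's disjointness test equals B's not-forbidden test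
lemma pv_cond_eq (animal_1 animal_2 : List (List Int)) (i j : Int)
    (hj : j ∈ PySem.List.pyRange 0 (animal_2.length : Int) 1) :
    (PySem.Set.inter (PySem.Set.ofList (PySem.List.pyGetD animal_1 i []))
        (PySem.Set.ofList (PySem.List.pyGetD animal_2 j []))).isEmpty =
      !(PySem.Set.contains
          ((PySem.List.pyGetD animal_1 i []).foldl (fun f x =>
              PySem.Set.union f (((PySem.List.pyRange 0 (animal_2.length : Int) 1).foldl (fun d j =>
                (PySem.List.pyGetD animal_2 j []).foldl (fun d x =>
                  d.insert x (PySem.Set.union (d.getD x PySem.Set.empty) [j])) d) PySem.Dict.empty).getD x PySem.Set.empty))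
            PySem.Set.empty) j) := by
  rw [Bool.eq_iff_iff]
  simp only [Bool.not_eq_true', Bool.eq_false_iff, Ne, PySem.Set.contains_iff, pv_mem_forbidden,
    pv_mem_getD_build, PySem.Dict.getD_empty, List.isEmpty_iff, List.eq_nil_iff_forall_not_mem,
    PySem.Set.mem_inter, PySem.Set.mem_ofList]
  simp only [PySem.Set.empty, List.not_mem_nil, false_or, not_exists, not_and]
  constructor
  · intro h x hx1 j2 hj2 hq hjj
    subst hjj
    exact h x hx1 hq
  · intro h y hy1 hy2
    exact h y hy1 j hj hy2 rfl

-- both nested append loops are a flatMap of a filtered map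
lemma pv_nested (rI rJ : List Int) (p : Int → Int → Bool) :
    rI.foldl (fun c i => rJ.foldl (fun c j => if p i j then c ++ [[i, j]] else c) c) [] =
      rI.flatMap (fun i => (rJ.filter (p i)).map (fun j => [i, j])) := by
  have h1 : ∀ (c : List (List Int)) (i : Int), i ∈ rI →
      rJ.foldl (fun c j => if p i j then c ++ [[i, j]] else c) c =
        c ++ (rJ.filter (p i)).map (fun j => [i, j]) :=
    fun c i _ => PySem.List.foldl_append_if (p i) (fun j => [i, j]) rJ c
  rw [PySem.List.foldl_congr_mem rI _ (fun c i => c ++ (rJ.filter (p i)).map (fun j => [i, j])) [] h1,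
    PySem.List.foldl_append_eq_flatMap]
  simp

-- ===== VERDICT (by name: the statement is the Claim_ definition above) =====
theorem list_two_animal_positions_spec : Claim_equal_list_two_animal_positions := by
  intro animal_1 animal_2 _
  unfold Spec_list_two_animal_positions list_two_animal_positions list_two_animal_positions_alt
  simp only []
  rw [pv_nested, pv_nested]
  refine List.flatMap_congr (fun i _ => ?_)
  exact congrArg _ (List.filter_congr (fun j hj => pv_cond_eq animal_1 animal_2 i j hj))
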